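-- pv_equiv track=rewrite | github.com/Hello-Go-Hard/Lab_python | Lab_python_Concurrent_Processing/first_task.py | max_begin_end_date
-- ===== SOURCE A (Python) =====
-- def max_begin_end_date(data):
--     begin_date_list = tuple(record.get('BeginDate') for record in data)
--     end_date_list = tuple(record.get('EndDate') for record in data)
--     countries = tuple(record.get('ManuCountry') for record in data)
--
--     new_column = ()
--     unknown_date = 0
--     for (date_of_begin, date_of_end) in zip(begin_date_list, end_date_list):
--         if not date_of_begin.isdigit() or not date_of_end.isdigit():
--             unknown_date += 1
--             new_column = new_column + (0,)
--         else:
--             new_column = new_column + (int(date_of_end) - int(date_of_begin),)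
--     unknown_date = (unknown_date, 'Unknown')
--     max_time = max(new_column)
--     max_time = (max_time, countries[new_column.index(max_time)])
--     return unknown_date, max_time
-- ===== SOURCE B (Python) =====
-- def max_begin_end_date(data):
--     # Single pass: count unknown dates and keep the first maximal (span, country) pair.
--     unknown = 0
--     best = None
--     for record in data:
--         begin = record.get('BeginDate')
--         end = record.get('EndDate')
--         if begin.isdigit() and end.isdigit():
--             span = int(end) - int(begin)
--         else:
--             unknown += 1
--             span = 0
--         if best is None or span > best[0]:
--             best = (span, record.get('ManuCountry'))
--     if best is None:
--         raise ValueError('max() arg is an empty sequence')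
--     return (unknown, 'Unknown'), best
-- ===== Notes on version B (the rewrite author's own statement) =====
-- stated objective: faster
-- what changed: Replaces A's three pre-extracted tuples, quadratic tuple concatenation and the max()+.index() rescans by one pass that counts unknown dates and maintains the running (best span, its country) pair with strict '>' (first-maximum semantics).
-- outside the precondition, e.g. on max_begin_end_date([]): A raises ValueError, B raises ValueError
import Mathlib
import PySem

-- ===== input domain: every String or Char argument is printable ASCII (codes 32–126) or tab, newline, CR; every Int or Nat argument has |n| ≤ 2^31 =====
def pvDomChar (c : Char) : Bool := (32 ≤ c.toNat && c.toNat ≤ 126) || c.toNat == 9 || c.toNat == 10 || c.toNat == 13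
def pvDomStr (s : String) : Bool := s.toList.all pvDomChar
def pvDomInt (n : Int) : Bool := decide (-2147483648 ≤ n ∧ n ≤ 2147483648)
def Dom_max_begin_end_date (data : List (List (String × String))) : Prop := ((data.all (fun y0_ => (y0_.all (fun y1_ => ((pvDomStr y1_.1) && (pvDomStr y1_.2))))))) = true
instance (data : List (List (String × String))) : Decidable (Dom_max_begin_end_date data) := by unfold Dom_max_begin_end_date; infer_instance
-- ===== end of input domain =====

-- B replaces A's three pre-extracted tuples, quadratic tuple concatenation and the max()+.index()
-- rescans by a single pass keeping the running (best span, country) pair; return value only.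

-- ===== PORT A =====
-- A-side helper: the body of A's for-loop over the zipped date columns
def pvStepA (acc : List Int × Int) (p : Option String × Option String) : List Int × Int :=
  -- Pre_ guarantees the keys are present (on a missing key Python calls None.isdigit() and raises)
  let date_of_begin := p.1.getD ""
  let date_of_end := p.2.getD ""
  if !(PySem.Str.strIsdigit date_of_begin) || !(PySem.Str.strIsdigit date_of_end) then
    (acc.1 ++ [(0 : Int)], acc.2 + 1)
  else
    (acc.1 ++ [(PySem.Int.ofStr? date_of_end).getD 0 - (PySem.Int.ofStr? date_of_begin).getD 0], acc.2)

def max_begin_end_date (data : List (List (String × String))) : List (Int × String) :=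
  let begin_date_list := data.map (fun record => (PySem.Dict.mk record).get? "BeginDate")
  let end_date_list := data.map (fun record => (PySem.Dict.mk record).get? "EndDate")
  let countries := data.map (fun record => (PySem.Dict.mk record).get? "ManuCountry")
  let st := (List.zip begin_date_list end_date_list).foldl pvStepA ([], (0 : Int))
  let new_column := st.1
  let unknown_date : Int := st.2
  -- Pre_ requires data ≠ [], so max? is some (Python max(()) raises ValueError)
  let max_time : Int := (PySem.List.max? new_column (fun y => y)).getD 0
  let idx : Nat := (PySem.List.index? new_column max_time).getD 0
  let country : String := ((PySem.List.pyGet? countries (idx : Int)).getD none).getD ""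
  [(unknown_date, "Unknown"), (max_time, country)]

-- ===== PORT B =====
-- B-side helper: the body of B's single pass (unknown counter, running best pair)
def pvStepB (acc : Int × Option (Int × String)) (record : List (String × String)) :
    Int × Option (Int × String) :=
  let d := PySem.Dict.mk record
  let begin_ := (d.get? "BeginDate").getD ""
  let end_ := (d.get? "EndDate").getD ""
  let us : Int × Int :=
    if PySem.Str.strIsdigit begin_ && PySem.Str.strIsdigit end_ then
      (acc.1, (PySem.Int.ofStr? end_).getD 0 - (PySem.Int.ofStr? begin_).getD 0)
    else
      (acc.1 + 1, 0)
  let best := match acc.2 with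
    | none => some (us.2, (d.get? "ManuCountry").getD "")
    | some p => if us.2 > p.1 then some (us.2, (d.get? "ManuCountry").getD "") else some p
  (us.1, best)

def max_begin_end_date_alt (data : List (List (String × String))) : List (Int × String) :=
  let st := data.foldl pvStepB ((0 : Int), none)
  match st.2 with
  | none => []  -- B's Python raises ValueError here (empty data, excluded by Pre_)
  | some p => [(st.1, "Unknown"), (p.1, p.2)]

-- ===== PRECONDITION & SPEC =====
-- The span A computes for one record: int(end)-int(begin) when both dates are all digits, else 0
-- (when the begin date is not all digits Python short-circuits and never touches the end date).
def pvSpan (r : List (String × String)) : Int :=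
  if PySem.Str.strIsdigit (((PySem.Dict.mk r).get? "BeginDate").getD "") &&
     PySem.Str.strIsdigit (((PySem.Dict.mk r).get? "EndDate").getD "") then
    (PySem.Int.ofStr? (((PySem.Dict.mk r).get? "EndDate").getD "")).getD 0 -
    (PySem.Int.ofStr? (((PySem.Dict.mk r).get? "BeginDate").getD "")).getD 0
  else 0

-- Pre_ excludes exactly the inputs where A raises or returns a non-value of the type: empty data
-- (max(()) raises ValueError), records missing 'BeginDate' — or missing 'EndDate' while the begin
-- date is all digits — (None.isdigit() raises AttributeError), and inputs whose first maximal-span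
-- record lacks 'ManuCountry' (A returns None there, not a string).
def Pre_max_begin_end_date (data : List (List (String × String))) : Prop :=
  data ≠ [] ∧
  (data.all (fun record =>
      (PySem.Dict.mk record).contains "BeginDate" &&
      (!(PySem.Str.strIsdigit (((PySem.Dict.mk record).get? "BeginDate").getD "")) ||
        (PySem.Dict.mk record).contains "EndDate"))) = true ∧
  ((match PySem.List.max? (data.map pvSpan) (fun y => y) with
    | none => true
    | some m =>
      match data.find? (fun r => pvSpan r == m) with
      | none => true
      | some r => (PySem.Dict.mk r).contains "ManuCountry") : Bool) = true
instance (data : List (List (String × String))) : Decidable (Pre_max_begin_end_date data) := by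
  unfold Pre_max_begin_end_date; infer_instance

def pvWitness_max_begin_end_date : (List (List (String × String))) :=
  [[("BeginDate", "1900"), ("EndDate", "1975"), ("ManuCountry", "France")],
   [("BeginDate", "??"), ("EndDate", "1950"), ("ManuCountry", "Italy")]]

def Spec_max_begin_end_date (data : List (List (String × String))) (out : List (Int × String)) : Prop := out = max_begin_end_date_alt data
instance (data : List (List (String × String))) (out : List (Int × String)) : Decidable (Spec_max_begin_end_date data out) := by unfold Spec_max_begin_end_date; infer_instance

-- ===== CLAIM (what is proved, stated in full; the proofs are below) =====
def Claim_equal_max_begin_end_date : Prop := ∀ (data : List (List (String × String))), Dom_max_begin_end_date data → Pre_max_begin_end_date data → Spec_max_begin_end_date data (max_begin_end_date data)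

-- ===== LEMMAS AND PROOFS =====

-- unknown-counter contribution of one record, its country as stored (Option) and looked up with default ""
def pvU (r : List (String × String)) : Int :=
  if PySem.Str.strIsdigit (((PySem.Dict.mk r).get? "BeginDate").getD "") &&
     PySem.Str.strIsdigit (((PySem.Dict.mk r).get? "EndDate").getD "") then 0 else 1

def pvCO (r : List (String × String)) : Option String := (PySem.Dict.mk r).get? "ManuCountry"

def pvC (r : List (String × String)) : String := (pvCO r).getD ""

-- B's best-pair update and the best pair of a nonempty list
def pvG (p : Int × String) (r : List (String × String)) : Int × String :=
  if pvSpan r > p.1 then (pvSpan r, pvC r) else p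

def pvBp : List (List (String × String)) → Int × String
  | [] => (0, "")
  | r :: t => t.foldl pvG (pvSpan r, pvC r)

theorem pvBp_append (L : List (List (String × String))) (x : List (String × String)) (h : L ≠ []) :
    pvBp (L ++ [x]) = pvG (pvBp L) x := by
  cases L with
  | nil => exact absurd rfl h
  | cons r t => simp [pvBp, List.foldl_append]

theorem pvBp_fst (t : List (List (String × String))) (p : Int × String) :
    (t.foldl pvG p).1 = (t.map pvSpan).foldl max p.1 := by
  induction t generalizing p with
  | nil => rfl
  | cons x t ih =>
    simp only [List.foldl_cons, List.map_cons, ih]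
    congr 1
    unfold pvG
    by_cases h : pvSpan x > p.1
    · simp [h, max_eq_right (le_of_lt h)]
    · simp [h, max_eq_left (not_lt.mp h)]

-- main invariant: the maximum of the span column is (pvBp L).1, and the first index of that
-- maximum points at a country cell that looks up to (pvBp L).2
theorem pvMain : ∀ L : List (List (String × String)), L ≠ [] →
    (∀ y ∈ L.map pvSpan, y ≤ (pvBp L).1) ∧
    ∃ k : Nat, PySem.List.index? (L.map pvSpan) (pvBp L).1 = some k ∧ k < L.length ∧
      (((L.map pvCO)[k]?).getD none).getD "" = (pvBp L).2 := by
  intro L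
  induction L using List.reverseRecOn with
  | nil => intro h; exact absurd rfl h
  | append_singleton L x ih =>
    intro _
    cases hL : L with
    | nil =>
      subst hL
      refine ⟨by simp [pvBp], 0, ?_, by simp, by simp [pvBp, pvC]⟩
      simp [pvBp]
    | cons r t =>
      rw [← hL]
      have hLne : L ≠ [] := by rw [hL]; exact List.cons_ne_nil _ _
      obtain ⟨hmax, k, hk, hklt, hc⟩ := ih hLne
      rw [pvBp_append L x hLne]
      unfold pvG
      by_cases hgt : pvSpan x > (pvBp L).1
      · simp only [if_pos hgt]
        constructor
        · intro y hy
          rw [List.map_append, List.mem_append] at hy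
          rcases hy with hy | hy
          · exact le_of_lt (lt_of_le_of_lt (hmax y hy) hgt)
          · simp at hy; omega
        · refine ⟨(L.map pvSpan).length, ?_, by simp, ?_⟩
          · rw [List.map_append]
            exact PySem.List.index?_append_singleton_self _ _
              (fun hmem => absurd (hmax _ hmem) (by omega))
          · have hlen : (L.map pvSpan).length = (L.map pvCO).length := by simp
            rw [List.map_append]
            simp only [hlen, List.map_cons, List.map_nil, List.getElem?_concat_length]
            rfl
      · simp only [if_neg hgt]
        constructor
        · intro y hy
          rw [List.map_append, List.mem_append] at hy
          rcases hy with hy | hy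
          · exact hmax y hy
          · simp at hy; omega
        · refine ⟨k, ?_, by simp; omega, ?_⟩
          · rw [List.map_append]
            rw [PySem.List.index?_append_of_mem _
              ((PySem.List.index?_isSome_iff _ _).mp (by rw [hk]; rfl))]
            exact hk
          · rw [List.map_append, List.getElem?_append_left (by simpa using hklt)]
            exact hc

-- A's loop over the zipped date columns appends the span column and counts unknown dates
theorem pvAloop (l : List (List (String × String))) (col : List Int) (u : Int) :
    (List.zip (l.map (fun record => (PySem.Dict.mk record).get? "BeginDate"))
              (l.map (fun record => (PySem.Dict.mk record).get? "EndDate"))).foldl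
      pvStepA (col, u)
    = (col ++ l.map pvSpan, u + (l.map pvU).sum) := by
  induction l generalizing col u with
  | nil => simp
  | cons r t ih =>
    rw [List.map_cons, List.map_cons, List.zip_cons_cons, List.foldl_cons]
    have hstep : pvStepA (col, u) ((PySem.Dict.mk r).get? "BeginDate", (PySem.Dict.mk r).get? "EndDate")
        = (col ++ [pvSpan r], u + pvU r) := by
      cases hA : PySem.Chars.strIsdigit ((((PySem.Dict.mk r).get? "BeginDate").getD "").toList) <;>
        cases hB : PySem.Chars.strIsdigit ((((PySem.Dict.mk r).get? "EndDate").getD "").toList) <;>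
        simp [pvStepA, hA, hB, pvSpan, pvU]
    rw [hstep, ih]
    simp [add_assoc]

-- B's loop step and, with a present best pair, its fold
theorem pvBstep (u : Int) (b : Option (Int × String)) (r : List (String × String)) :
    pvStepB (u, b) r
      = (u + pvU r, some (match b with
          | none => (pvSpan r, pvC r)
          | some p => pvG p r)) := by
  cases b with
  | none =>
    cases hA : PySem.Chars.strIsdigit ((((PySem.Dict.mk r).get? "BeginDate").getD "").toList) <;>
      cases hB : PySem.Chars.strIsdigit ((((PySem.Dict.mk r).get? "EndDate").getD "").toList) <;>
      simp [pvStepB, hA, hB, pvSpan, pvU, pvC, pvCO]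
  | some p =>
    cases hA : PySem.Chars.strIsdigit ((((PySem.Dict.mk r).get? "BeginDate").getD "").toList) <;>
      cases hB : PySem.Chars.strIsdigit ((((PySem.Dict.mk r).get? "EndDate").getD "").toList) <;>
      simp [pvStepB, hA, hB, pvSpan, pvU, pvC, pvCO, pvG] <;> split_ifs <;> simp

theorem pvBloop (l : List (List (String × String))) (u : Int) (p : Int × String) :
    l.foldl pvStepB (u, some p) = (u + (l.map pvU).sum, some (l.foldl pvG p)) := by
  induction l generalizing u p with
  | nil => simp
  | cons r t ih =>
    rw [List.foldl_cons, pvBstep, ih]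
    simp [add_assoc]

theorem portA_eq (r : List (String × String)) (t : List (List (String × String))) :
    max_begin_end_date (r :: t)
      = [(pvU r + (t.map pvU).sum, "Unknown"), ((pvBp (r :: t)).1, (pvBp (r :: t)).2)] := by
  obtain ⟨hmax, k, hk, hklt, hc⟩ := pvMain (r :: t) (List.cons_ne_nil r t)
  have hfst : (pvBp (r :: t)).1 = (t.map pvSpan).foldl max (pvSpan r) := by
    simpa [pvBp] using pvBp_fst t (pvSpan r, pvC r)
  simp only [max_begin_end_date]
  rw [pvAloop]
  simp only [List.nil_append, List.map_cons, List.sum_cons, zero_add]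
  rw [PySem.List.max?_id_cons]
  simp only [Option.getD_some]
  rw [← hfst]
  have hk' : PySem.List.index? (pvSpan r :: List.map pvSpan t) (pvBp (r :: t)).1 = some k := by
    simpa using hk
  rw [hk']
  simp only [Option.getD_some]
  rw [show ((PySem.Dict.mk r).get? "ManuCountry"
        :: List.map (fun record => (PySem.Dict.mk record).get? "ManuCountry") t)
        = List.map pvCO (r :: t) from rfl]
  rw [PySem.List.pyGet?_natCast]
  have hc' : ((List.map pvCO (r :: t))[k]?.getD none).getD "" = (pvBp (r :: t)).2 := by
    simpa using hc
  rw [hc']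

theorem portB_eq (r : List (String × String)) (t : List (List (String × String))) :
    max_begin_end_date_alt (r :: t)
      = [(pvU r + (t.map pvU).sum, "Unknown"), ((pvBp (r :: t)).1, (pvBp (r :: t)).2)] := by
  simp only [max_begin_end_date_alt]
  rw [List.foldl_cons, pvBstep, pvBloop]
  simp [pvBp]

-- ===== VERDICT (by name: the statement is the Claim_ definition above) =====
theorem max_begin_end_date_spec : Claim_equal_max_begin_end_date := by
  intro data _ hpre
  unfold Spec_max_begin_end_date
  cases data with
  | nil => exact absurd rfl hpre.1
  | cons r t => rw [portA_eq, portB_eq]
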